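-- pv_equiv track=rewrite | github.com/HKUST-KnowComp/EventGround | src/preprocess_SCT_pairs.py | get_group_comparison
-- ===== SOURCE A (Python) =====
-- import itertools
--
-- def get_group_comparison(event_groups):
--     all_pairs = set()
--     for i in range(len(event_groups)):
--         for j in range(i+1, len(event_groups)):
--             head = event_groups[i]
--             tail = event_groups[j]
--             for pair in itertools.product(head, tail):
--                 all_pairs.add(pair)
--     return all_pairs
-- ===== SOURCE B (Python) =====
-- def get_group_comparison(event_groups):
--     n = len(event_groups)
--     # globally dedup candidate left elements: x can only start a new pair at its first group
--     seen_left = set()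
--     lefts = []
--     for g in event_groups:
--         cur = []
--         for x in g:
--             if x not in seen_left:
--                 seen_left.add(x)
--                 cur.append(x)
--         lefts.append(cur)
--     out = []
--     for i in range(n):
--         # right elements already paired with lefts[i] (groups i+1..j-1) need not be paired again
--         seen_right = set()
--         for j in range(i + 1, n):
--             news = []
--             for y in event_groups[j]:
--                 if y not in seen_right:
--                     seen_right.add(y)
--                     news.append(y)
--             for x in lefts[i]:
--                 for y in news:
--                     out.append((x, y))
--     return set(out)
-- ===== Notes on version B (the rewrite author's own statement) =====
-- stated objective: alternative
-- what changed: B replaces A's dedup-by-set over the full nested product stream by first-occurrence dedup of left elements plus a per-row seen-right set, so each cross pair is appended exactly once instead of being re-generated for every duplicate occurrence and filtered by the set.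
import Mathlib
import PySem

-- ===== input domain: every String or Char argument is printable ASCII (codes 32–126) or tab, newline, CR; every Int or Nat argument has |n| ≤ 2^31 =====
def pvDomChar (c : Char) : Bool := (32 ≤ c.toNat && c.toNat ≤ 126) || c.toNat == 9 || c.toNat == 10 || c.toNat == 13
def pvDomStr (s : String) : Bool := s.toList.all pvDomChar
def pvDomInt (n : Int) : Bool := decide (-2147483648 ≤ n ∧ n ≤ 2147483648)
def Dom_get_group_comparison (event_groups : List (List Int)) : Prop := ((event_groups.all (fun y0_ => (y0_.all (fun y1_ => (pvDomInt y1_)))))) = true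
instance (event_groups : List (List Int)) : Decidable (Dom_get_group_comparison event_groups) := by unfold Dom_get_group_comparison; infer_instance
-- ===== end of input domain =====

-- B avoids re-generating duplicate pairs: left elements are deduplicated at their first
-- group, and per left group a seen-right set keeps each right element from being paired
-- twice, so each pair is appended exactly once (objective: alternative algorithm).

-- ===== PORT A =====
def get_group_comparison (event_groups : List (List Int)) : List (Int × Int) :=
  (PySem.List.pyRange 0 (PySem.List.len event_groups) 1).foldl
    (fun all_pairs i =>
      (PySem.List.pyRange (i + 1) (PySem.List.len event_groups) 1).foldl
        (fun ap j =>
          let head := PySem.List.pyGetD event_groups i []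
          let tail := PySem.List.pyGetD event_groups j []
          -- itertools.product(head, tail) ported by hand: row-major pairs (exact)
          (head.flatMap (fun x => tail.map (fun y => (x, y)))).foldl PySem.Set.add ap)
        all_pairs)
    PySem.Set.empty

-- ===== PORT B =====
-- _fresh(seen, xs): the new (not-yet-seen) elements of xs in order; returns (updated seen, new ones)
def fresh {α : Type} [BEq α] (seen : PySem.Set α) (xs : List α) : PySem.Set α × List α :=
  xs.foldl
    (fun p x => if PySem.Set.contains p.1 x then p else (PySem.Set.add p.1 x, p.2 ++ [x]))
    (seen, [])

def get_group_comparison_alt (event_groups : List (List Int)) : List (Int × Int) :=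
  let n := PySem.List.len event_groups
  let lefts := (event_groups.foldl
      (fun (st : PySem.Set Int × List (List Int)) g =>
        let r := fresh st.1 g
        (r.1, st.2 ++ [r.2]))
      (PySem.Set.empty, [])).2
  let out := (PySem.List.pyRange 0 n 1).foldl
    (fun out i =>
      ((PySem.List.pyRange (i + 1) n 1).foldl
        (fun (st : List (Int × Int) × PySem.Set Int) j =>
          let r := fresh st.2 (PySem.List.pyGetD event_groups j [])
          let news := r.2
          ((PySem.List.pyGetD lefts i []).foldl
            (fun o x => news.foldl (fun o2 y => o2 ++ [(x, y)]) o) st.1,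
           r.1))
        (out, PySem.Set.empty)).1)
    []
  PySem.Set.ofList out

-- ===== PRECONDITION & SPEC =====
def Spec_get_group_comparison (event_groups : List (List Int)) (out : List (Int × Int)) : Prop := out = get_group_comparison_alt event_groups
instance (event_groups : List (List Int)) (out : List (Int × Int)) : Decidable (Spec_get_group_comparison event_groups out) := by unfold Spec_get_group_comparison; infer_instance

-- ===== CLAIM (what is proved, stated in full; the proofs are below) =====
def Claim_equal_get_group_comparison : Prop := ∀ (event_groups : List (List Int)), Dom_get_group_comparison event_groups → Spec_get_group_comparison event_groups (get_group_comparison event_groups)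

-- ===== LEMMAS AND PROOFS =====

-- group i (in range) of gs
def gAt (gs : List (List Int)) (i : Int) : List Int := PySem.List.pyGetD gs i []

-- row-major product, = list(itertools.product(h, t))
def prodL (h t : List Int) : List (Int × Int) := h.flatMap (fun x => t.map (fun y => (x, y)))

-- elements of l not contained in s, first occurrences, in order
def newOf {α : Type} [BEq α] (s : List α) : List α → List α
  | [] => []
  | x :: l => if s.contains x then newOf s l else x :: newOf (s ++ [x]) l

-- sequential dedup of a list of blocks against a growing seen set
def newFlat {α : Type} [BEq α] (s : List α) : List (List α) → List α
  | [] => []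
  | b :: bs => newOf s b ++ newFlat (s ++ newOf s b) bs

-- the per-group new left elements, threading the seen set
def leftsOf (s : List Int) : List (List Int) → List (List Int)
  | [] => []
  | g :: rest => newOf s g :: leftsOf (s ++ newOf s g) rest

-- recursion form of B's inner row loop
def rowB (gs : List (List Int)) (L : List Int) (R : PySem.Set Int) : List Int → List (Int × Int)
  | [] => []
  | j :: js =>
      let r := fresh R (gAt gs j)
      prodL L r.2 ++ rowB gs L r.1 js

-- all elements of groups 0..i-1
def flatTake (gs : List (List Int)) (i : Int) : List Int :=
  (PySem.List.pyRange 0 i 1).flatMap (gAt gs)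

-- all elements of groups i+1..j-1
def flatSeg (gs : List (List Int)) (i j : Int) : List Int :=
  (PySem.List.pyRange (i + 1) j 1).flatMap (gAt gs)

-- ---- generic lemmas about newOf / newFlat ----

theorem fresh_eq {α : Type} [BEq α] (l : List α) (s : List α) (acc : List α) :
    l.foldl
      (fun p x => if PySem.Set.contains p.1 x then p else (PySem.Set.add p.1 x, p.2 ++ [x]))
      (s, acc)
    = (s ++ newOf s l, acc ++ newOf s l) := by
  simp only [PySem.Set.contains, PySem.Set.add]
  induction l generalizing s acc with
  | nil => simp [newOf]
  | cons x l ih =>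
    simp only [List.foldl_cons]
    by_cases h : s.contains x
    · rw [newOf, if_pos h]; simpa [h] using ih s acc
    · rw [newOf, if_neg h]; simpa [h, List.append_assoc] using ih (s ++ [x]) (acc ++ [x])

theorem fresh_spec {α : Type} [BEq α] (s : PySem.Set α) (l : List α) :
    fresh s l = (s ++ newOf s l, newOf s l) := by
  unfold fresh
  rw [fresh_eq]
  simp

theorem foldl_add_eq {α : Type} [BEq α] (l : List α) (s : List α) :
    l.foldl PySem.Set.add s = s ++ newOf s l := by
  induction l generalizing s with
  | nil => simp [newOf]
  | cons x l ih =>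
    simp only [List.foldl_cons]
    by_cases h : s.contains x
    · simp [PySem.Set.add, PySem.Set.contains, h, newOf, ih]
    · simp [PySem.Set.add, PySem.Set.contains, h, newOf, ih, List.append_assoc]

theorem mem_newOf {α : Type} [BEq α] [LawfulBEq α] (l : List α) (s : List α) (a : α) :
    a ∈ newOf s l ↔ a ∈ l ∧ s.contains a = false := by
  induction l generalizing s with
  | nil => simp [newOf]
  | cons x l ih =>
    by_cases h : s.contains x
    · rw [newOf, if_pos h, ih]
      simp only [List.contains_eq_mem] at h ⊢
      simp only [List.mem_cons]
      constructor
      · rintro ⟨ha, hc⟩; exact ⟨Or.inr ha, hc⟩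
      · rintro ⟨ha | ha, hc⟩
        · subst ha; simp at h hc; exact absurd h hc
        · exact ⟨ha, hc⟩
    · rw [newOf, if_neg h]
      by_cases hax : a = x
      · subst hax
        simp only [List.contains_eq_mem] at h ⊢
        simp at h
        simp [h]
      · simp only [List.mem_cons, ih, List.contains_append, List.contains_eq_mem] at *
        simp [hax]

theorem contains_newOf_append {α : Type} [BEq α] [LawfulBEq α] (l : List α) (s : List α) (a : α) :
    (s ++ newOf s l).contains a = (s.contains a || l.contains a) := by
  by_cases h : a ∈ s <;>
    simp [List.contains_append, List.contains_eq_mem, mem_newOf, h]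

theorem newOf_congr {α : Type} [BEq α] (l : List α) (s t : List α)
    (h : ∀ x ∈ l, s.contains x = t.contains x) : newOf s l = newOf t l := by
  induction l generalizing s t with
  | nil => simp [newOf]
  | cons x l ih =>
    have hx := h x (by simp)
    rw [newOf, newOf, hx]
    by_cases hc : t.contains x
    · rw [if_pos hc, if_pos hc]
      exact ih s t (fun z hz => h z (by simp [hz]))
    · rw [if_neg hc, if_neg hc]
      rw [ih (s ++ [x]) (t ++ [x]) (fun z hz => by
        simp [List.contains_append, h z (by simp [hz])])]

theorem newOf_append {α : Type} [BEq α] (l₁ l₂ : List α) (s : List α) :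
    newOf s (l₁ ++ l₂) = newOf s l₁ ++ newOf (s ++ newOf s l₁) l₂ := by
  induction l₁ generalizing s with
  | nil => simp [newOf]
  | cons x l ih =>
    by_cases h : s.contains x <;>
      simp [newOf, h, ih, List.append_assoc]

theorem newOf_all {α : Type} [BEq α] (l : List α) (s : List α)
    (h : ∀ x ∈ l, s.contains x = true) : newOf s l = [] := by
  induction l generalizing s with
  | nil => simp [newOf]
  | cons x l ih =>
    rw [newOf, if_pos (h x (by simp))]
    exact ih s (fun z hz => h z (by simp [hz]))

theorem newOf_map {α β : Type} [BEq α] [BEq β] [LawfulBEq α] [LawfulBEq β]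
    (f : α → β) (hf : Function.Injective f) (l : List α) (S : List β) (V : List α)
    (h : ∀ y ∈ l, S.contains (f y) = V.contains y) :
    newOf S (l.map f) = (newOf V l).map f := by
  induction l generalizing S V with
  | nil => simp [newOf]
  | cons y l ih =>
    have hy := h y (by simp)
    rw [List.map_cons, newOf, newOf, hy]
    by_cases hc : V.contains y
    · rw [if_pos hc, if_pos hc]
      exact ih S V (fun z hz => h z (by simp [hz]))
    · rw [if_neg hc, if_neg hc, List.map_cons]
      rw [ih (S ++ [f y]) (V ++ [y]) (fun z hz => by
        have hzz : (f z ∈ S) ↔ (z ∈ V) := by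
          have := h z (by simp [hz]); simpa [List.contains_eq_mem] using this
        simp [List.contains_append, List.contains_eq_mem, hf.eq_iff, hzz])]

theorem newFlat_append {α : Type} [BEq α] (bs₁ bs₂ : List (List α)) (s : List α) :
    newFlat s (bs₁ ++ bs₂) = newFlat s bs₁ ++ newFlat (s ++ newFlat s bs₁) bs₂ := by
  induction bs₁ generalizing s with
  | nil => simp [newFlat]
  | cons b bs ih =>
    simp [newFlat, ih, List.append_assoc]

theorem mem_newFlat {α : Type} [BEq α] [LawfulBEq α] (bs : List (List α)) (s : List α) (a : α) :
    a ∈ newFlat s bs ↔ a ∈ bs.flatten ∧ s.contains a = false := by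
  induction bs generalizing s with
  | nil => simp [newFlat]
  | cons b bs ih =>
    by_cases hs : a ∈ s <;> by_cases hb : a ∈ b <;>
      simp [newFlat, mem_newOf, ih, contains_newOf_append,
        List.contains_append, List.contains_eq_mem, hs, hb] <;> tauto

theorem contains_newFlat_append {α : Type} [BEq α] [LawfulBEq α] (bs : List (List α)) (s : List α) (a : α) :
    (s ++ newFlat s bs).contains a = (s.contains a || bs.flatten.contains a) := by
  by_cases h : a ∈ s <;>
    simp [List.contains_append, List.contains_eq_mem, mem_newFlat, h]

theorem foldl_add_flatten {α : Type} [BEq α] (bs : List (List α)) (s : List α) :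
    bs.flatten.foldl PySem.Set.add s = s ++ newFlat s bs := by
  induction bs generalizing s with
  | nil => simp [newFlat]
  | cons b bs ih =>
    simp only [List.flatten_cons, List.foldl_append]
    rw [ih, foldl_add_eq, newFlat]
    simp [List.append_assoc]

-- ---- the product block lemma ----

theorem mem_prodL (h t : List Int) (x y : Int) :
    (x, y) ∈ prodL h t ↔ x ∈ h ∧ y ∈ t := by
  simp only [prodL, List.mem_flatMap, List.mem_map, Prod.mk.injEq]
  constructor
  · rintro ⟨a, ha, b, hb, rfl, rfl⟩; exact ⟨ha, hb⟩
  · rintro ⟨hx, hy⟩; exact ⟨x, hx, y, hy, rfl, rfl⟩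

theorem newOf_prod (h t : List Int) (S : List (Int × Int)) (U V : List Int)
    (hS : ∀ x ∈ h, ∀ y ∈ t, S.contains (x, y) = (U.contains x || V.contains y)) :
    newOf S (prodL h t) = prodL (newOf U h) (newOf V t) := by
  induction h generalizing S U with
  | nil => simp [prodL, newOf]
  | cons x h' ih =>
    have hsplit : prodL (x :: h') t = t.map (fun y => (x, y)) ++ prodL h' t := by
      simp [prodL]
    rw [hsplit, newOf_append]
    by_cases hU : U.contains x
    · have hall : ∀ p ∈ t.map (fun y => (x, y)), S.contains p = true := by
        rintro p hp
        simp only [List.mem_map] at hp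
        obtain ⟨y, hy, rfl⟩ := hp
        rw [hS x (by simp) y hy, hU]; simp
      rw [newOf_all _ _ hall]
      simp only [List.append_nil]
      rw [newOf, if_pos hU]
      exact ih S U (fun x' hx' y hy => hS x' (by simp [hx']) y hy)
    · have hinj : Function.Injective (fun y : Int => (x, y)) := by
        intro a b hab; simpa using hab
      have hU' : U.contains x = false := by simpa using hU
      have hmap : newOf S (t.map (fun y => (x, y))) = (newOf V t).map (fun y => (x, y)) := by
        refine newOf_map _ hinj _ _ _ (fun y hy => ?_)
        rw [hS x (by simp) y hy, hU']; simp
      rw [hmap, newOf, if_neg hU]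
      rw [ih (S ++ (newOf V t).map (fun y => (x, y))) (U ++ [x]) (fun x' hx' y hy => by
        rw [List.contains_append, hS x' (by simp [hx']) y hy, List.contains_append]
        by_cases hVy : y ∈ V <;> by_cases hxx : x' = x <;>
          simp [List.contains_eq_mem, mem_newOf, hVy, hxx, hy, List.mem_map,
            Prod.mk.injEq] <;> tauto)]
      simp [prodL]

-- ---- range bookkeeping ----

theorem take_eq_mapRange (gs : List (List Int)) (k : Nat) (hk : k ≤ gs.length) :
    (PySem.List.pyRange 0 (k : Int) 1).map (fun j => PySem.List.pyGetD gs j []) = gs.take k := by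
  induction k with
  | zero => simp [PySem.List.pyRange_one_eq_nil]
  | succ k ih =>
    rw [show ((k + 1 : Nat) : Int) = (k : Int) + 1 by push_cast; ring]
    have h0k : (0 : Int) ≤ (k : Int) := Int.natCast_nonneg k
    have hk' : k < gs.length := by omega
    rw [PySem.List.pyRange_one_succ_right h0k, List.map_append, ih (by omega)]
    have hgd := PySem.List.pyGetD_eq_getElem gs (i := (k : Int)) [] h0k
      (by exact_mod_cast hk')
    simp only [Int.toNat_natCast] at hgd
    rw [List.take_succ]
    simp [hgd, List.getElem?_eq_getElem hk']

theorem flatTake_succ (gs : List (List Int)) (i : Int) (hi : 0 ≤ i) :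
    flatTake gs (i + 1) = flatTake gs i ++ gAt gs i := by
  unfold flatTake
  rw [PySem.List.pyRange_one_succ_right hi, List.flatMap_append]
  simp

theorem flatTake_eq (gs : List (List Int)) (k : Nat) (hk : k ≤ gs.length) :
    flatTake gs (k : Int) = (gs.take k).flatten := by
  unfold flatTake
  rw [show List.flatMap (gAt gs) (PySem.List.pyRange 0 (k : Int) 1)
      = ((PySem.List.pyRange 0 (k : Int) 1).map (fun j => PySem.List.pyGetD gs j [])).flatten from by
    rw [List.flatMap_def]; rfl]
  rw [take_eq_mapRange gs k hk]

theorem flatSeg_succ (gs : List (List Int)) (i j : Int) (hij : i < j) :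
    flatSeg gs i (j + 1) = flatSeg gs i j ++ gAt gs j := by
  unfold flatSeg
  rw [PySem.List.pyRange_one_succ_right (by omega), List.flatMap_append]
  simp

-- ---- port A as a deduped flat product list ----

theorem portA_eq (gs : List (List Int)) :
    get_group_comparison gs
      = newFlat []
          ((PySem.List.pyRange 0 (PySem.List.len gs) 1).flatMap
            (fun i => (PySem.List.pyRange (i + 1) (PySem.List.len gs) 1).map
              (fun j => prodL (gAt gs i) (gAt gs j)))) := by
  have h1 : ∀ (bs : List (List (Int × Int))),
      newFlat ([] : List (Int × Int)) bs = bs.flatten.foldl PySem.Set.add [] := by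
    intro bs; rw [foldl_add_flatten]; simp
  rw [h1]
  simp only [get_group_comparison, prodL, gAt, List.flatMap_def,
    List.foldl_flatten, List.foldl_map]
  rfl

-- ---- port B structure lemmas ----

theorem leftsOf_eq (gs : List (List Int)) (s : List Int) (acc : List (List Int)) :
    gs.foldl
      (fun (st : PySem.Set Int × List (List Int)) g =>
        let r := fresh st.1 g
        (r.1, st.2 ++ [r.2]))
      (s, acc)
    = (s ++ (leftsOf s gs).flatten, acc ++ leftsOf s gs) := by
  induction gs generalizing s acc with
  | nil => simp [leftsOf]
  | cons g rest ih =>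
    simp only [fresh_spec] at ih ⊢
    simp only [List.foldl_cons]
    rw [ih]
    simp [leftsOf, List.append_assoc]

theorem leftsOf_get (gs : List (List Int)) (s : List Int) (k : Nat) (hk : k < gs.length) :
    (leftsOf s gs)[k]? = some (newOf (s ++ ((gs.take k).flatten)) (gs[k]'hk)) := by
  induction gs generalizing s k with
  | nil => exact absurd hk (by simp)
  | cons g rest ih =>
    cases k with
    | zero => simp [leftsOf]
    | succ k =>
      simp only [leftsOf, List.getElem?_cons_succ]
      rw [ih (s ++ newOf s g) k (by simpa using hk)]
      simp only [List.take_succ_cons, List.flatten_cons, List.getElem_cons_succ]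
      congr 1
      refine newOf_congr _ _ _ (fun x _ => ?_)
      rw [List.contains_append, contains_newOf_append, List.contains_append,
        List.contains_append, Bool.or_assoc]

theorem length_leftsOf (gs : List (List Int)) (s : List Int) :
    (leftsOf s gs).length = gs.length := by
  induction gs generalizing s with
  | nil => simp [leftsOf]
  | cons g rest ih => simp [leftsOf, ih]

theorem rowB_foldl (gs : List (List Int)) (L : List Int) (js : List Int)
    (out : List (Int × Int)) (R : PySem.Set Int) :
    (js.foldl
      (fun (st : List (Int × Int) × PySem.Set Int) j =>
        let r := fresh st.2 (PySem.List.pyGetD gs j [])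
        let news := r.2
        (L.foldl (fun o x => news.foldl (fun o2 y => o2 ++ [(x, y)]) o) st.1, r.1))
      (out, R)).1
    = out ++ rowB gs L R js := by
  have hdouble : ∀ (L news : List Int) (o : List (Int × Int)),
      L.foldl (fun o x => news.foldl (fun o2 y => o2 ++ [(x, y)]) o) o
        = o ++ prodL L news := by
    intro L news o
    induction L generalizing o with
    | nil => simp [prodL]
    | cons x L ihL =>
      simp only [PySem.List.foldl_append_singleton_eq_map] at ihL ⊢
      simp only [List.foldl_cons]
      rw [ihL]
      simp [prodL, List.append_assoc]
  induction js generalizing out R with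
  | nil => simp [rowB]
  | cons j js ih =>
    simp only [fresh_spec, hdouble] at ih ⊢
    simp only [List.foldl_cons]
    rw [ih]
    simp [rowB, fresh_spec, gAt, hdouble, List.append_assoc]

theorem portB_eq (gs : List (List Int)) :
    get_group_comparison_alt gs
      = PySem.Set.ofList
          ((PySem.List.pyRange 0 (PySem.List.len gs) 1).flatMap
            (fun i => rowB gs (newOf (flatTake gs i) (gAt gs i)) []
              (PySem.List.pyRange (i + 1) (PySem.List.len gs) 1))) := by
  have hl := congrArg Prod.snd (leftsOf_eq gs PySem.Set.empty [])
  simp only [List.nil_append] at hl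
  simp only [get_group_comparison_alt, hl, rowB_foldl]
  rw [PySem.List.foldl_append_eq_flatMap]
  simp only [List.nil_append]
  congr 1
  rw [List.flatMap_def, List.flatMap_def]
  congr 1
  refine List.map_congr_left (fun i hi => ?_)
  rw [PySem.List.mem_pyRange_one] at hi
  obtain ⟨h0, h1⟩ := hi
  have hklt : i.toNat < gs.length := by
    rw [PySem.List.len_eq] at h1; omega
  have hlen : i < ((leftsOf PySem.Set.empty gs).length : Int) := by
    rw [length_leftsOf, ← PySem.List.len_eq]; exact h1
  rw [PySem.List.pyGetD_eq_getElem _ _ h0 hlen]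
  have hget := leftsOf_get gs PySem.Set.empty i.toNat hklt
  rw [List.getElem?_eq_getElem (by rw [length_leftsOf]; exact hklt)] at hget
  have heq := Option.some.inj hget
  rw [heq]
  have hto : ((i.toNat : Nat) : Int) = i := Int.toNat_of_nonneg h0
  have harg : gAt gs i = gs[i.toNat] := by
    rw [gAt, PySem.List.pyGetD_eq_getElem gs [] h0 (by rw [← PySem.List.len_eq]; exact h1)]
  have hset : ∀ x : Int, (PySem.Set.empty ++ (List.take i.toNat gs).flatten).contains x
      = (flatTake gs i).contains x := by
    intro x
    rw [show flatTake gs i = flatTake gs ((i.toNat : Nat) : Int) by rw [hto]]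
    rw [flatTake_eq gs i.toNat (le_of_lt hklt)]
    simp [PySem.Set.empty]
  have hnewOf : newOf (PySem.Set.empty ++ (List.take i.toNat gs).flatten) (gs[i.toNat]'hklt)
      = newOf (flatTake gs i) (gs[i.toNat]'hklt) :=
    newOf_congr _ _ _ (fun x _ => hset x)
  rw [harg, hnewOf]
  rfl

-- ---- the main correspondence ----

theorem main_row (gs : List (List Int)) (i : Int) (kk : Nat) :
    ∀ (j : Int), i < j → j + kk = PySem.List.len gs →
    ∀ (S : List (Int × Int)) (R : List Int),
      (∀ y : Int, R.contains y = (flatSeg gs i j).contains y) →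
      (∀ x ∈ gAt gs i, ∀ (j' : Int), j ≤ j' → j' < PySem.List.len gs → ∀ y ∈ gAt gs j',
        S.contains (x, y) = ((flatTake gs i).contains x || R.contains y)) →
      newFlat S ((PySem.List.pyRange j (PySem.List.len gs) 1).map (fun j' => prodL (gAt gs i) (gAt gs j')))
        = rowB gs (newOf (flatTake gs i) (gAt gs i)) R (PySem.List.pyRange j (PySem.List.len gs) 1) := by
  induction kk with
  | zero =>
    intro j hij hjn S R hR hS
    rw [PySem.List.pyRange_one_eq_nil (by omega)]
    simp [newFlat, rowB]
  | succ kk ih =>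
    intro j hij hjn S R hR hS
    have hjlt : j < PySem.List.len gs := by omega
    rw [PySem.List.pyRange_one_cons hjlt]
    simp only [List.map_cons]
    rw [newFlat]
    have hprod := newOf_prod (gAt gs i) (gAt gs j) S (flatTake gs i) R
      (fun x hx y hy => hS x hx j le_rfl hjlt y hy)
    rw [hprod, rowB, fresh_spec]
    simp only []
    congr 1
    exact ih (j + 1) (by omega) (by omega)
      (S ++ prodL (newOf (flatTake gs i) (gAt gs i)) (newOf R (gAt gs j)))
      (R ++ newOf R (gAt gs j))
      (fun y => by
        rw [contains_newOf_append, hR y, flatSeg_succ gs i j hij, List.contains_append])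
      (fun x hx j' hj1 hj2 y hy => by
        rw [← hprod, contains_newOf_append, hS x hx j' (by omega) hj2 y hy,
          contains_newOf_append]
        have hpc : (prodL (gAt gs i) (gAt gs j)).contains (x, y) = (gAt gs j).contains y := by
          simp [List.contains_eq_mem, mem_prodL, hx]
        rw [hpc, Bool.or_assoc])

theorem main_outer (gs : List (List Int)) (k : Nat) :
    ∀ (i : Int), 0 ≤ i → i + k = PySem.List.len gs →
    ∀ (S : List (Int × Int)),
      (∀ x y : Int, (∃ j : Int, i < j ∧ j < PySem.List.len gs ∧ y ∈ gAt gs j) →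
        S.contains (x, y) = (flatTake gs i).contains x) →
      newFlat S ((PySem.List.pyRange i (PySem.List.len gs) 1).flatMap
          (fun i' => (PySem.List.pyRange (i' + 1) (PySem.List.len gs) 1).map
            (fun j => prodL (gAt gs i') (gAt gs j))))
        = (PySem.List.pyRange i (PySem.List.len gs) 1).flatMap
            (fun i' => rowB gs (newOf (flatTake gs i') (gAt gs i')) []
              (PySem.List.pyRange (i' + 1) (PySem.List.len gs) 1)) := by
  induction k with
  | zero =>
    intro i hi hik S hS
    rw [PySem.List.pyRange_one_eq_nil (by omega)]
    simp [newFlat]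
  | succ k ih =>
    intro i hi hik S hS
    have hin : i < PySem.List.len gs := by omega
    rw [PySem.List.pyRange_one_cons hin]
    simp only [List.flatMap_cons]
    rw [newFlat_append]
    have hrow := main_row gs i k (i + 1) (by omega) (by omega) S []
      (by intro y; simp [flatSeg, PySem.List.pyRange_one_eq_nil])
      (by intro x hx j' hj1 hj2 y hy
          rw [hS x y ⟨j', by omega, hj2, hy⟩]
          simp)
    rw [hrow]
    congr 1
    exact ih (i + 1) (by omega) (by omega)
      (S ++ rowB gs (newOf (flatTake gs i) (gAt gs i)) []
        (PySem.List.pyRange (i + 1) (PySem.List.len gs) 1))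
      (fun x y hex => by
        obtain ⟨jy, hjy1, hjy2, hjy3⟩ := hex
        rw [← hrow, contains_newFlat_append, hS x y ⟨jy, by omega, hjy2, hjy3⟩]
        have hfl : ((x, y) ∈ ((PySem.List.pyRange (i + 1) (PySem.List.len gs) 1).map
            (fun j => prodL (gAt gs i) (gAt gs j))).flatten) ↔ x ∈ gAt gs i := by
          constructor
          · rintro hm
            simp only [List.mem_flatten, List.mem_map] at hm
            obtain ⟨b, ⟨jj, hjj, rfl⟩, hb⟩ := hm
            exact ((mem_prodL _ _ _ _).mp hb).1
          · intro hx
            simp only [List.mem_flatten, List.mem_map]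
            exact ⟨prodL (gAt gs i) (gAt gs jy),
              ⟨jy, by rw [PySem.List.mem_pyRange_one]; omega, rfl⟩,
              (mem_prodL _ _ _ _).mpr ⟨hx, hjy3⟩⟩
        rw [flatTake_succ gs i hi, List.contains_append]
        simp only [PySem.List.len_eq] at hfl
        simp [List.contains_eq_mem, hfl])

theorem nodup_append_newOf {α : Type} [BEq α] [LawfulBEq α] (l s : List α)
    (hs : s.Nodup) : (s ++ newOf s l).Nodup := by
  induction l generalizing s with
  | nil => simpa [newOf]
  | cons x l ih =>
    rw [newOf]
    by_cases h : s.contains x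
    · rw [if_pos h]; exact ih s hs
    · rw [if_neg h]
      have hx : x ∉ s := by simpa [List.contains_eq_mem] using h
      have := ih (s ++ [x]) (by
        simp [List.nodup_append, hs]
        exact fun a ha he => hx (he ▸ ha))
      simpa [List.append_assoc] using this

theorem nodup_newFlat {α : Type} [BEq α] [LawfulBEq α] (bs : List (List α)) (s : List α)
    (hs : s.Nodup) : (s ++ newFlat s bs).Nodup := by
  induction bs generalizing s with
  | nil => simpa [newFlat]
  | cons b bs ih =>
    rw [newFlat]
    have := ih (s ++ newOf s b) (nodup_append_newOf b s hs)
    simpa [List.append_assoc] using this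

theorem newOf_of_nodup {α : Type} [BEq α] [LawfulBEq α] (l s : List α)
    (hl : l.Nodup) (hd : ∀ a ∈ l, s.contains a = false) : newOf s l = l := by
  induction l generalizing s with
  | nil => simp [newOf]
  | cons x l ih =>
    have hxs : s.contains x = false := hd x (by simp)
    rw [newOf, if_neg (by rw [hxs]; simp)]
    congr 1
    refine ih (s ++ [x]) (List.nodup_cons.mp hl).2 (fun a ha => ?_)
    rw [List.contains_append, hd a (by simp [ha])]
    have hax : a ≠ x := fun he => (List.nodup_cons.mp hl).1 (he ▸ ha)
    simp [List.contains_eq_mem, hax]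

theorem ofList_newFlat {α : Type} [BEq α] [LawfulBEq α] (bs : List (List α)) :
    PySem.Set.ofList (newFlat [] bs) = newFlat ([] : List α) bs := by
  have h1 : (newFlat ([] : List α) bs).Nodup := by
    simpa using nodup_newFlat bs [] (by simp)
  rw [show PySem.Set.ofList (newFlat ([] : List α) bs)
      = (newFlat ([] : List α) bs).foldl PySem.Set.add [] from rfl]
  rw [foldl_add_eq]
  simp only [List.nil_append]
  exact newOf_of_nodup _ _ h1 (by simp)

-- ===== VERDICT (by name: the statement is the Claim_ definition above) =====
theorem get_group_comparison_spec : Claim_equal_get_group_comparison := by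
  intro gs _
  unfold Spec_get_group_comparison
  have hmain := main_outer gs (PySem.List.len gs).toNat 0 le_rfl
    (by simp [PySem.List.len_eq]) []
    (by intro x y _; simp [flatTake, PySem.List.pyRange_one_eq_nil])
  rw [portA_eq, portB_eq, ← hmain, ofList_newFlat, hmain]
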